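-- pv_equiv track=rewrite | github.com/RichardWhitfield/code1161base | week3/exercise1.py | gene_krupa_range
-- ===== SOURCE A (Python) =====
-- def gene_krupa_range(start, stop, even_step, odd_step):
--     """Make a range that has two step sizes.
--
--     make a list that instead of having evenly spaced steps
--     has odd steps be one size and even steps be another.
--     """
--     x = []
--     a = start
--     while a <= stop:
--         if a == 0:
--             x.append(start)
--             a = a + 1
--         elif a % 2 == 0:
--             start = start + even_step
--             x.append(start)
--             a = a + 1
--         else:
--             start = start + odd_step
--             x.append(start)
--             a = a + 1
--     return x
-- ===== SOURCE B (Python) =====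
-- def gene_krupa_range(start, stop, even_step, odd_step):
--     # Closed form: the k-th output is start plus even_step times the number of
--     # even nonzero values in [start, a] plus odd_step times the number of odd
--     # values in [start, a]; each element is computed independently, no running state.
--     out = []
--     for a in range(start, stop + 1):
--         evens = a // 2 - (start - 1) // 2
--         zero = 1 if start <= 0 <= a else 0
--         odds = (a - start + 1) - evens
--         out.append(start + even_step * (evens - zero) + odd_step * odds)
--     return out
-- ===== Notes on version B (the rewrite author's own statement) =====
-- stated objective: alternative
-- what changed: Replaces A's stateful running-sum loop (which mutates 'start' step by step) with a per-element closed-form formula: the k-th output is the original start plus even_step times the count of even nonzero values and odd_step times the count of odd values in [start, a], each count computed by floor-division arithmetic with no running state.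
import Mathlib
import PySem

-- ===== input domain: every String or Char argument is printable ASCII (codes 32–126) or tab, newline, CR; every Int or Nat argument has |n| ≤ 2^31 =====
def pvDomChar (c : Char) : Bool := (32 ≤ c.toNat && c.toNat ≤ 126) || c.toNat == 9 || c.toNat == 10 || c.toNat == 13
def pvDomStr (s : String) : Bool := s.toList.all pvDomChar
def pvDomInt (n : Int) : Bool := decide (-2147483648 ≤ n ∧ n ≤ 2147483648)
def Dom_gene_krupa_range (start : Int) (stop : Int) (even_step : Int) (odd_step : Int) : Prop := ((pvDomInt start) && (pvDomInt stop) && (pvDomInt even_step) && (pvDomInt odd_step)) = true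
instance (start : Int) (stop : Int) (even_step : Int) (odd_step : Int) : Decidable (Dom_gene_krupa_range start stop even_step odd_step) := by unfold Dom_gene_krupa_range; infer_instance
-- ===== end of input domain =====

-- B replaces A's stateful running-sum loop with a closed-form parity-count formula computed independently per element (alternative algorithm, same cost).

-- ===== PORT A =====
-- the while-loop of A: state is (a, start, x); each iteration appends and increments a.
-- fuel = (stop + 1 - a).toNat is exactly the number of remaining iterations (a totality guard only).
def geneKrupaLoop (stop even_step odd_step : Int) (fuel : Nat) (a start : Int) (x : List Int) : List Int :=
  match fuel with
  | 0 => x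
  | fuel + 1 =>
    if a ≤ stop then
      if a = 0 then
        geneKrupaLoop stop even_step odd_step fuel (a + 1) start (x ++ [start])
      else if PySem.Int.mod a 2 = 0 then
        geneKrupaLoop stop even_step odd_step fuel (a + 1) (start + even_step) (x ++ [start + even_step])
      else
        geneKrupaLoop stop even_step odd_step fuel (a + 1) (start + odd_step) (x ++ [start + odd_step])
    else x

def gene_krupa_range (start : Int) (stop : Int) (even_step : Int) (odd_step : Int) : List Int :=
  geneKrupaLoop stop even_step odd_step (stop + 1 - start).toNat start start []

-- ===== PORT B =====
-- B: each element is computed by a closed-form count of even/odd positions, no running state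
def gene_krupa_range_alt (start : Int) (stop : Int) (even_step : Int) (odd_step : Int) : List Int :=
  (PySem.List.pyRange start (stop + 1) 1).map (fun a =>
    let evens := PySem.Int.floordiv a 2 - PySem.Int.floordiv (start - 1) 2
    let zero : Int := if start ≤ 0 ∧ 0 ≤ a then 1 else 0
    let odds := (a - start + 1) - evens
    start + even_step * (evens - zero) + odd_step * odds)

-- ===== PRECONDITION & SPEC =====
def Spec_gene_krupa_range (start : Int) (stop : Int) (even_step : Int) (odd_step : Int) (out : List Int) : Prop := out = gene_krupa_range_alt start stop even_step odd_step
instance (start : Int) (stop : Int) (even_step : Int) (odd_step : Int) (out : List Int) : Decidable (Spec_gene_krupa_range start stop even_step odd_step out) := by unfold Spec_gene_krupa_range; infer_instance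

-- ===== CLAIM =====
def Claim_equal_gene_krupa_range : Prop := ∀ (start : Int) (stop : Int) (even_step : Int) (odd_step : Int), Dom_gene_krupa_range start stop even_step odd_step → Spec_gene_krupa_range start stop even_step odd_step (gene_krupa_range start stop even_step odd_step)

-- ===== LEMMAS AND PROOFS =====

-- count of even nonzero / odd integers in [a, b] (closed forms used by B)
def gkE (a b : Int) : Int :=
  PySem.Int.floordiv b 2 - PySem.Int.floordiv (a - 1) 2 - (if a ≤ 0 ∧ 0 ≤ b then 1 else 0)
def gkO (a b : Int) : Int :=
  (b - a + 1) - (PySem.Int.floordiv b 2 - PySem.Int.floordiv (a - 1) 2)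

-- the closed-form element value relative to a loop restart point a with accumulator s
def gkElem (even_step odd_step a s b : Int) : Int :=
  s + even_step * gkE a b + odd_step * gkO a b

lemma fd2 (x : Int) : 2 * PySem.Int.floordiv x 2 + PySem.Int.mod x 2 = x ∧
    0 ≤ PySem.Int.mod x 2 ∧ PySem.Int.mod x 2 < 2 := by
  refine ⟨?_, PySem.Int.mod_nonneg x (by norm_num), PySem.Int.mod_lt x (by norm_num)⟩
  have := PySem.Int.floordiv_mul_add_mod x 2
  omega

lemma gk_self_zero : gkE 0 0 = 0 ∧ gkO 0 0 = 0 := by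
  unfold gkE gkO; norm_num

lemma gk_self_even (a : Int) (h0 : a ≠ 0) (h2 : PySem.Int.mod a 2 = 0) :
    gkE a a = 1 ∧ gkO a a = 0 := by
  obtain ⟨ha1, ha2, ha3⟩ := fd2 a
  obtain ⟨hb1, hb2, hb3⟩ := fd2 (a - 1)
  unfold gkE gkO; split_ifs <;> omega

lemma gk_self_odd (a : Int) (h2 : PySem.Int.mod a 2 ≠ 0) :
    gkE a a = 0 ∧ gkO a a = 1 := by
  obtain ⟨ha1, ha2, ha3⟩ := fd2 a
  obtain ⟨hb1, hb2, hb3⟩ := fd2 (a - 1)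
  unfold gkE gkO; split_ifs <;> omega

lemma gk_step_zero (b : Int) (hb : 1 ≤ b) : gkE 0 b = gkE 1 b ∧ gkO 0 b = gkO 1 b := by
  unfold gkE gkO
  simp only [show (0:Int) - 1 = -1 from by ring, show (1:Int) - 1 = 0 from by ring]
  obtain ⟨h1, h2, h3⟩ := fd2 0
  obtain ⟨h4, h5, h6⟩ := fd2 (-1)
  split_ifs <;> omega

lemma gk_step_even (a b : Int) (h0 : a ≠ 0) (h2 : PySem.Int.mod a 2 = 0) (_hb : a + 1 ≤ b) :
    gkE a b = gkE (a + 1) b + 1 ∧ gkO a b = gkO (a + 1) b := by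
  unfold gkE gkO
  simp only [show a + 1 - 1 = a from by ring]
  obtain ⟨ha1, ha2, ha3⟩ := fd2 a
  obtain ⟨hb1, hb2, hb3⟩ := fd2 (a - 1)
  split_ifs <;> omega

lemma gk_step_odd (a b : Int) (_h0 : a ≠ 0) (h2 : PySem.Int.mod a 2 ≠ 0) (_hb : a + 1 ≤ b) :
    gkE a b = gkE (a + 1) b ∧ gkO a b = gkO (a + 1) b + 1 := by
  unfold gkE gkO
  simp only [show a + 1 - 1 = a from by ring]
  obtain ⟨ha1, ha2, ha3⟩ := fd2 a
  obtain ⟨hb1, hb2, hb3⟩ := fd2 (a - 1)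
  split_ifs <;> omega

lemma gk_tail (even_step odd_step stop : Int) (a s s' : Int) (x : List Int)
    (hel : gkElem even_step odd_step a s a = s')
    (hpt : ∀ b, a + 1 ≤ b → gkElem even_step odd_step a s b = gkElem even_step odd_step (a + 1) s' b) :
    x ++ [s'] ++ (PySem.List.pyRange (a + 1) (stop + 1) 1).map (gkElem even_step odd_step (a + 1) s') =
    x ++ gkElem even_step odd_step a s a ::
      (PySem.List.pyRange (a + 1) (stop + 1) 1).map (gkElem even_step odd_step a s) := by
  rw [List.append_assoc, List.singleton_append, hel]
  congr 2
  exact List.map_congr_left (fun b hb =>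
    (hpt b (PySem.List.mem_pyRange_one.mp hb).1).symm)

lemma geneKrupaLoop_eq (stop even_step odd_step : Int) :
    ∀ (n : ℕ) (a s : Int) (x : List Int), (stop + 1 - a).toNat = n →
    geneKrupaLoop stop even_step odd_step n a s x =
      x ++ (PySem.List.pyRange a (stop + 1) 1).map (gkElem even_step odd_step a s) := by
  intro n
  induction n with
  | zero =>
    intro a s x h
    rw [geneKrupaLoop, PySem.List.pyRange_one_eq_nil (by omega)]
    simp
  | succ n ih =>
    intro a s x h
    have hle : a ≤ stop := by omega
    rw [geneKrupaLoop, if_pos hle, PySem.List.pyRange_one_cons (by omega), List.map_cons]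
    by_cases h0 : a = 0
    · rw [if_pos h0, ih (a + 1) s (x ++ [s]) (by omega)]
      subst h0
      exact gk_tail even_step odd_step stop 0 s s x
        (by unfold gkElem; rw [gk_self_zero.1, gk_self_zero.2]; ring)
        (fun b hb => by
          unfold gkElem
          rw [(gk_step_zero b (by omega)).1, (gk_step_zero b (by omega)).2]
          norm_num)
    · rw [if_neg h0]
      by_cases h2 : PySem.Int.mod a 2 = 0
      · rw [if_pos h2, ih (a + 1) (s + even_step) (x ++ [s + even_step]) (by omega)]
        exact gk_tail even_step odd_step stop a s (s + even_step) x
          (by unfold gkElem; rw [(gk_self_even a h0 h2).1, (gk_self_even a h0 h2).2]; ring)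
          (fun b hb => by
            unfold gkElem
            rw [(gk_step_even a b h0 h2 hb).1, (gk_step_even a b h0 h2 hb).2]; ring)
      · rw [if_neg h2, ih (a + 1) (s + odd_step) (x ++ [s + odd_step]) (by omega)]
        exact gk_tail even_step odd_step stop a s (s + odd_step) x
          (by unfold gkElem; rw [(gk_self_odd a h2).1, (gk_self_odd a h2).2]; ring)
          (fun b hb => by
            unfold gkElem
            rw [(gk_step_odd a b h0 h2 hb).1, (gk_step_odd a b h0 h2 hb).2]; ring)

-- ===== VERDICT =====
theorem gene_krupa_range_spec : Claim_equal_gene_krupa_range := by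
  intro start stop even_step odd_step _
  unfold Spec_gene_krupa_range gene_krupa_range gene_krupa_range_alt
  rw [geneKrupaLoop_eq stop even_step odd_step (stop + 1 - start).toNat start start [] rfl]
  simp [gkElem, gkE, gkO]
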